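-- pv_equiv track=rewrite | github.com/georgetown-cset/article-linking | utils/make_unlink_rows.py | make_pairs
-- ===== SOURCE A (Python) =====
-- def make_pairs(manual_to_orig: dict) -> list:
--     """
--     Make all pairs of ids that should be unlinked
--     :param manual_to_orig: Dict mapping manually assigned ids to original ids that we believe to be the same article
--     :return: A list of pairs of ids that should not be linked together
--     """
--     pairs = []
--     for manual1 in manual_to_orig:
--         for orig1 in manual_to_orig[manual1]:
--             for manual2 in manual_to_orig:
--                 if manual1 == manual2:
--                     continue
--                 for orig2 in manual_to_orig[manual2]:
--                     pairs.append((orig1, orig2))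
--     return pairs
-- ===== SOURCE B (Python) =====
-- def make_pairs(manual_to_orig: dict) -> list:
--     """Prefix/suffix scheme: one backward pass builds the suffix-flattened lists,
--     then one forward sweep pairs each group's origs with prefix + suffix (the
--     origs of all OTHER groups), eliminating A's inner key loop and its
--     manual1 == manual2 guard entirely."""
--     groups = list(manual_to_orig.values())
--     suffix = [[]]
--     for g in reversed(groups):
--         suffix.append(g + suffix[-1])
--     suffix.reverse()
--     pairs = []
--     prefix = []
--     for g, suf in zip(groups, suffix[1:]):
--         others = prefix + suf
--         pairs.extend((o1, o2) for o1 in g for o2 in others)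
--         prefix = prefix + g
--     return pairs
-- ===== Notes on version B (the rewrite author's own statement) =====
-- stated objective: alternative
-- what changed: Replaces A's four nested loops over dict keys with a manual1==manual2 guard and repeated dict lookups by a two-pass prefix/suffix scheme: one backward pass precomputes suffix-flattened orig lists, then one forward sweep pairs each group's origs with prefix+suffix (the origs of all other groups), with no key comparison or dict lookup at all.
import Mathlib
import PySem

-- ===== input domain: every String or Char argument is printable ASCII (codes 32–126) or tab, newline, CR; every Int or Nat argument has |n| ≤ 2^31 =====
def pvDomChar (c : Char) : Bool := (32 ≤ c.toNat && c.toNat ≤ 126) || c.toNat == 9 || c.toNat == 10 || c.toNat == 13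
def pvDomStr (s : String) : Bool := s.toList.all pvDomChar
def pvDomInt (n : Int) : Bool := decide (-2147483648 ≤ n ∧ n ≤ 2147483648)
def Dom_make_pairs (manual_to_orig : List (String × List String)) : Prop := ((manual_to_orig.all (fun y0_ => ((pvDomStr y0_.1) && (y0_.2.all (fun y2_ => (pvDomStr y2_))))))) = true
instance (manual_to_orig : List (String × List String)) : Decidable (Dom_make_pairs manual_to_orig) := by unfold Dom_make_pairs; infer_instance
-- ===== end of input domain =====

-- B replaces A's four nested key loops (with dict lookups and a manual1==manual2 guard) by a
-- backward suffix-flattening pass plus one forward prefix sweep (objective: alternative).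

-- ===== PORT A =====
def make_pairs (manual_to_orig : List (String × List String)) : List (String × String) :=
  (PySem.Dict.mk manual_to_orig).keys.foldl (fun pairs manual1 =>
    ((PySem.Dict.mk manual_to_orig).getD manual1 []).foldl (fun pairs orig1 =>
      (PySem.Dict.mk manual_to_orig).keys.foldl (fun pairs manual2 =>
        if manual1 == manual2 then pairs
        else ((PySem.Dict.mk manual_to_orig).getD manual2 []).foldl (fun pairs orig2 =>
          pairs ++ [(orig1, orig2)]) pairs) pairs) pairs) []

-- ===== PORT B =====
def make_pairs_alt (manual_to_orig : List (String × List String)) : List (String × String) :=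
  let groups := manual_to_orig.map Prod.snd
  -- backward pass: suffix[i] = flatten of groups[i:], built by appending then reversing
  let suffix := (groups.reverse.foldl (fun s g => s ++ [g ++ s.getLastD []]) [[]]).reverse
  -- forward sweep with a running prefix of already-seen origs
  let r := (groups.zip suffix.tail).foldl
    (fun (st : List String × List (String × String)) gi =>
      let others := st.1 ++ gi.2
      (st.1 ++ gi.1, st.2 ++ gi.1.flatMap (fun o1 => others.map (fun o2 => (o1, o2)))))
    ([], [])
  r.2

-- ===== PRECONDITION & SPEC =====
-- Pre_ excludes association lists with duplicate keys: a Python dict cannot contain them,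
-- so such lists do not represent any input A accepts.
def Pre_make_pairs (manual_to_orig : List (String × List String)) : Prop :=
  (manual_to_orig.map Prod.fst).Nodup
instance (manual_to_orig : List (String × List String)) : Decidable (Pre_make_pairs manual_to_orig) := by unfold Pre_make_pairs; infer_instance
def pvWitness_make_pairs : (List (String × List String)) := [("a", ["1", "2"]), ("b", ["3"])]

def Spec_make_pairs (manual_to_orig : List (String × List String)) (out : List (String × String)) : Prop := out = make_pairs_alt manual_to_orig
instance (manual_to_orig : List (String × List String)) (out : List (String × String)) : Decidable (Spec_make_pairs manual_to_orig out) := by unfold Spec_make_pairs; infer_instance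

-- ===== CLAIM (what is proved, stated in full; the proofs are below) =====
def Claim_equal_make_pairs : Prop := ∀ (manual_to_orig : List (String × List String)), Dom_make_pairs manual_to_orig → Pre_make_pairs manual_to_orig → Spec_make_pairs manual_to_orig (make_pairs manual_to_orig)

-- ===== LEMMAS AND PROOFS =====

-- canonical middle form A is reduced to
def pvCanon (mto : List (String × List String)) : List (String × String) :=
  mto.flatMap (fun p1 => p1.2.flatMap (fun o1 =>
    mto.flatMap (fun p2 =>
      if p1.1 == p2.1 then [] else p2.2.map (fun o2 => (o1, o2)))))

-- positional middle form B is reduced to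
def pvPos (pre : List String) : List (List String) → List (String × String)
  | [] => []
  | g :: t => g.flatMap (fun o1 => (pre ++ t.flatten).map (fun o2 => (o1, o2)))
      ++ pvPos (pre ++ g) t

-- recursive characterisation of B's suffix list
def pvSuffixes : List (List String) → List (List String)
  | [] => [[]]
  | g :: t => (g ++ (pvSuffixes t).headD []) :: pvSuffixes t

theorem pvFlatMap_congr {α β : Type} {l : List α} {f g : α → List β}
    (h : ∀ x ∈ l, f x = g x) : l.flatMap f = l.flatMap g := by
  induction l with
  | nil => rfl
  | cons a t ih =>
    simp only [List.flatMap_cons, h a (by simp), ih (fun x hx => h x (by simp [hx]))]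

-- innermost orig2-loop of A
theorem pvInner2 (o1 : String) (os : List String) (pairs : List (String × String)) :
    os.foldl (fun p o2 => p ++ [(o1, o2)]) pairs = pairs ++ os.map (fun o2 => (o1, o2)) := by
  induction os generalizing pairs with
  | nil => simp
  | cons a t ih => rw [List.foldl_cons, ih, List.map_cons]; simp

-- manual2-loop of A
theorem pvInner3 (d : PySem.Dict String (List String)) (m1 o1 : String)
    (ks : List String) (pairs : List (String × String)) :
    ks.foldl (fun p m2 => if m1 == m2 then p
        else (d.getD m2 []).foldl (fun p o2 => p ++ [(o1, o2)]) p) pairs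
      = pairs ++ ks.flatMap (fun m2 =>
          if m1 == m2 then [] else (d.getD m2 []).map (fun o2 => (o1, o2))) := by
  induction ks generalizing pairs with
  | nil => simp
  | cons a t ih =>
    rw [List.foldl_cons, List.flatMap_cons, ih]
    cases h : m1 == a with
    | true => simp
    | false =>
      rw [if_neg Bool.false_ne_true, if_neg Bool.false_ne_true, pvInner2, List.append_assoc]

-- orig1-loop of A
theorem pvInner4 (d : PySem.Dict String (List String)) (ks : List String) (m1 : String)
    (os : List String) (pairs : List (String × String)) :
    os.foldl (fun p o1 => ks.foldl (fun p m2 => if m1 == m2 then p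
        else (d.getD m2 []).foldl (fun p o2 => p ++ [(o1, o2)]) p) p) pairs
      = pairs ++ os.flatMap (fun o1 => ks.flatMap (fun m2 =>
          if m1 == m2 then [] else (d.getD m2 []).map (fun o2 => (o1, o2)))) := by
  induction os generalizing pairs with
  | nil => simp
  | cons a t ih =>
    rw [List.foldl_cons, List.flatMap_cons, ih, pvInner3, List.append_assoc]

-- manual1-loop of A
theorem pvOuter (d : PySem.Dict String (List String)) (ksAll : List String)
    (ks : List String) (pairs : List (String × String)) :
    ks.foldl (fun p m1 => (d.getD m1 []).foldl (fun p o1 =>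
        ksAll.foldl (fun p m2 => if m1 == m2 then p
          else (d.getD m2 []).foldl (fun p o2 => p ++ [(o1, o2)]) p) p) p) pairs
      = pairs ++ ks.flatMap (fun m1 => (d.getD m1 []).flatMap (fun o1 =>
          ksAll.flatMap (fun m2 =>
            if m1 == m2 then [] else (d.getD m2 []).map (fun o2 => (o1, o2))))) := by
  induction ks generalizing pairs with
  | nil => simp
  | cons a t ih =>
    rw [List.foldl_cons, List.flatMap_cons, ih, pvInner4, List.append_assoc]

-- under nodup keys, iterating over keys with getD lookups = iterating over the entries
theorem pvKeyToEntry {α : Type} (G : String → List String → List α) :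
    ∀ (mto : List (String × List String)), (mto.map Prod.fst).Nodup →
    (mto.map Prod.fst).flatMap (fun m => G m ((PySem.Dict.mk mto).getD m []))
      = mto.flatMap (fun p => G p.1 p.2) := by
  intro mto
  induction mto with
  | nil => intro _; rfl
  | cons a t ih =>
    obtain ⟨k, v⟩ := a
    intro hnd
    simp only [List.map_cons, List.nodup_cons, List.mem_map] at hnd
    obtain ⟨hni, hnd⟩ := hnd
    simp only [List.map_cons, List.flatMap_cons]
    have h1 : (PySem.Dict.mk ((k, v) :: t)).getD k [] = v := by
      rw [PySem.Dict.getD_eq_get?_getD, PySem.Dict.get?_mk_cons]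
      simp
    have h2 : (t.map Prod.fst).flatMap (fun m => G m ((PySem.Dict.mk ((k, v) :: t)).getD m []))
        = (t.map Prod.fst).flatMap (fun m => G m ((PySem.Dict.mk t).getD m [])) := by
      apply pvFlatMap_congr
      intro m hm
      have hne : (k == m) = false := by
        simp only [beq_eq_false_iff_ne, ne_eq]
        intro he
        exact hni (by
          rcases List.mem_map.mp hm with ⟨p, hp, hpe⟩
          exact ⟨p, hp, by rw [hpe, he]⟩)
      rw [PySem.Dict.getD_eq_get?_getD, PySem.Dict.get?_mk_cons, hne]
      simp [PySem.Dict.getD_eq_get?_getD]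
    rw [h1, h2, ih hnd]

theorem pvA_eq_canon (mto : List (String × List String))
    (hnd : (mto.map Prod.fst).Nodup) : make_pairs mto = pvCanon mto := by
  unfold make_pairs
  rw [show (PySem.Dict.mk mto).keys = mto.map Prod.fst from PySem.Dict.keys_mk mto]
  rw [pvOuter (PySem.Dict.mk mto) (mto.map Prod.fst) (mto.map Prod.fst) []]
  rw [List.nil_append]
  rw [pvKeyToEntry (fun m1 os1 => os1.flatMap (fun o1 =>
        (mto.map Prod.fst).flatMap (fun m2 =>
          if m1 == m2 then [] else ((PySem.Dict.mk mto).getD m2 []).map (fun o2 => (o1, o2)))))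
      mto hnd]
  unfold pvCanon
  apply pvFlatMap_congr
  intro p1 _
  apply pvFlatMap_congr
  intro o1 _
  exact pvKeyToEntry (fun m2 os2 => if p1.1 == m2 then [] else os2.map (fun o2 => (o1, o2))) mto hnd

-- guarded flatMap over entries whose keys all differ from k = plain map over the flattened origs
theorem pvGuardAll (k : String) (f : String → String × String) :
    ∀ (l : List (String × List String)), k ∉ l.map Prod.fst →
    l.flatMap (fun p2 => if k == p2.1 then [] else p2.2.map f)
      = ((l.map Prod.snd).flatten).map f := by
  intro l
  induction l with
  | nil => intro _; rfl
  | cons a t ih =>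
    intro hk
    simp only [List.map_cons, List.mem_cons, not_or] at hk
    rw [List.flatMap_cons, if_neg (by simp [hk.1]), List.map_cons, List.flatten_cons,
        List.map_append, ih hk.2]

-- A's canonical form = the positional form, given nodup keys (with an accumulator of done entries)
theorem pvCanon_pos :
    ∀ (rest done : List (String × List String)),
    ((done ++ rest).map Prod.fst).Nodup →
    rest.flatMap (fun p1 => p1.2.flatMap (fun o1 =>
        (done ++ rest).flatMap (fun p2 =>
          if p1.1 == p2.1 then [] else p2.2.map (fun o2 => (o1, o2)))))
      = pvPos ((done.map Prod.snd).flatten) (rest.map Prod.snd) := by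
  intro rest
  induction rest with
  | nil => intro done _; rfl
  | cons p t ih =>
    intro done hnd
    have hsplit : done ++ p :: t = (done ++ [p]) ++ t := by simp
    have hmid : (p.1 :: (done.map Prod.fst ++ t.map Prod.fst)).Nodup := by
      rw [← List.nodup_middle]; simpa using hnd
    rw [List.nodup_cons] at hmid
    have hkd : p.1 ∉ done.map Prod.fst := fun h => hmid.1 (List.mem_append_left _ h)
    have hkt : p.1 ∉ t.map Prod.fst := fun h => hmid.1 (List.mem_append_right _ h)
    rw [List.flatMap_cons, List.map_cons]
    unfold pvPos
    congr 1
    · apply pvFlatMap_congr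
      intro o1 _
      rw [List.flatMap_append, List.flatMap_cons,
          pvGuardAll p.1 (fun o2 => (o1, o2)) done hkd,
          pvGuardAll p.1 (fun o2 => (o1, o2)) t hkt,
          if_pos (beq_self_eq_true p.1), List.nil_append, ← List.map_append]
    · have h2 : t.flatMap (fun p1 => p1.2.flatMap (fun o1 =>
          ((done ++ [p]) ++ t).flatMap (fun p2 =>
            if p1.1 == p2.1 then [] else p2.2.map (fun o2 => (o1, o2)))))
          = pvPos (((done ++ [p]).map Prod.snd).flatten) (t.map Prod.snd) :=
        ih (done ++ [p]) (by rw [← hsplit]; exact hnd)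
      rw [← hsplit] at h2
      rw [h2]
      simp
theorem pvSuffixes_headD : ∀ (gs : List (List String)),
    (pvSuffixes gs).headD [] = gs.flatten := by
  intro gs
  cases gs with
  | nil => rfl
  | cons g t =>
    show g ++ (pvSuffixes t).headD [] = _
    rw [pvSuffixes_headD t, List.flatten_cons]

-- the iteratively built suffix list of B equals the recursive characterisation
theorem pvSuffixes_iter : ∀ (gs : List (List String)),
    (gs.reverse.foldl (fun s g => s ++ [g ++ s.getLastD []]) [[]]).reverse
      = pvSuffixes gs := by
  intro gs
  induction gs with
  | nil => rfl
  | cons g t ih =>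
    rw [List.reverse_cons, List.foldl_append, List.foldl_cons, List.foldl_nil]
    have h1 : (t.reverse.foldl (fun s g => s ++ [g ++ s.getLastD []]) [[]])
        = (pvSuffixes t).reverse := by rw [← ih]; simp
    rw [h1]
    have hlast : (pvSuffixes t).reverse.getLastD [] = t.flatten := by
      cases h : pvSuffixes t with
      | nil => cases t <;> simp_all [pvSuffixes]
      | cons a l =>
        have hh := pvSuffixes_headD t
        rw [h] at hh
        simp at hh
        simp [hh]
    rw [hlast, List.reverse_append]
    simp [pvSuffixes]
    rw [← pvSuffixes_headD t]
    cases pvSuffixes t <;> simp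

theorem pvPos_cons (pre g : List String) (t : List (List String)) :
    pvPos pre (g :: t)
      = g.flatMap (fun o1 => (pre ++ t.flatten).map (fun o2 => (o1, o2))) ++ pvPos (pre ++ g) t :=
  rfl

-- B's forward sweep computes the positional form
theorem pvSweep : ∀ (gs : List (List String)) (pre : List String)
    (pairs : List (String × String)),
    ((gs.zip (pvSuffixes gs).tail).foldl
      (fun (st : List String × List (String × String)) gi =>
        (st.1 ++ gi.1, st.2 ++ gi.1.flatMap (fun o1 => (st.1 ++ gi.2).map (fun o2 => (o1, o2)))))
      (pre, pairs))
      = (pre ++ gs.flatten, pairs ++ pvPos pre gs) := by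
  intro gs
  induction gs with
  | nil => intro pre pairs; simp [pvSuffixes, pvPos]
  | cons g t ih =>
    intro pre pairs
    have htail : (pvSuffixes (g :: t)).tail = pvSuffixes t := rfl
    have hsuf : pvSuffixes t = t.flatten :: (pvSuffixes t).tail := by
      cases h : pvSuffixes t with
      | nil => cases t <;> simp_all [pvSuffixes]
      | cons a l =>
        have := pvSuffixes_headD t
        rw [h] at this; simp at this; simp [this]
    rw [htail, hsuf, List.zip_cons_cons, List.foldl_cons, ih, pvPos_cons]
    simp

theorem pvB_eq_pos (mto : List (String × List String)) :
    make_pairs_alt mto = pvPos [] (mto.map Prod.snd) := by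
  unfold make_pairs_alt
  simp only [pvSuffixes_iter, pvSweep]
  simp

-- ===== VERDICT (by name: the statement is the Claim_ definition above) =====
theorem make_pairs_spec : Claim_equal_make_pairs := by
  intro mto _ hpre
  unfold Spec_make_pairs
  rw [pvA_eq_canon mto hpre, pvB_eq_pos mto]
  unfold pvCanon
  have := pvCanon_pos mto [] (by simpa using hpre)
  simpa using this
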